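-- pv_equiv track=rewrite | github.com/testors/aim_downloader | aim_telemetry.py | _repair_timecode_wrap
-- ===== SOURCE A (Python) =====
-- def _repair_timecode_wrap(ticks: list[int]) -> list[int]:
--     base = ticks[0] - (ticks[0] & 0xFFFF)
--     wraps = 0
--     repaired = [base + (ticks[0] & 0xFFFF)]
--     for tick in ticks[1:]:
--         candidate = base + wraps * 65536 + (tick & 0xFFFF)
--         if candidate < repaired[-1]:
--             wraps += 1
--             candidate = base + wraps * 65536 + (tick & 0xFFFF)
--         repaired.append(candidate)
--     return repaired
-- ===== SOURCE B (Python) =====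
-- def _repair_timecode_wrap(ticks: list[int]) -> list[int]:
--     base = ticks[0] - (ticks[0] & 0xFFFF)
--     lows = [t & 0xFFFF for t in ticks]
--     wraps = [0]
--     for prev, cur in zip(lows, lows[1:]):
--         wraps.append(wraps[-1] + (1 if cur < prev else 0))
--     return [base + w * 65536 + lo for w, lo in zip(wraps, lows)]
-- ===== Notes on version B (the rewrite author's own statement) =====
-- stated objective: alternative
-- what changed: Replaces A's single stateful scan (recomputing a candidate and comparing to repaired[-1]) with three passes: extract base and low 16 bits, accumulate a cumulative wrap count from adjacent low comparisons, then reconstruct each value by a closed formula base + wraps*65536 + low.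
import Mathlib
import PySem

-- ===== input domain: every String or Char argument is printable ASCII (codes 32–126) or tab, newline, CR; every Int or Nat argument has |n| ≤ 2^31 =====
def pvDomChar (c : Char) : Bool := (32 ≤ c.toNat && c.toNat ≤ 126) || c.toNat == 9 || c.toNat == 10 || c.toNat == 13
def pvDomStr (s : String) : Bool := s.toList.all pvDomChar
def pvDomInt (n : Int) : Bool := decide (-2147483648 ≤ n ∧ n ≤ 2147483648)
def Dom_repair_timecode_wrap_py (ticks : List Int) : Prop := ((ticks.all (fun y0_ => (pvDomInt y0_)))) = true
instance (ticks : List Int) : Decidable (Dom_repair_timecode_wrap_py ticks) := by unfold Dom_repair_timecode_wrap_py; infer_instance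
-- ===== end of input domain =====

-- B unwraps the 16-bit counter by three separate passes (lows, cumulative wrap counts, reconstruction)
-- instead of A's single stateful scan; same O(n) cost, equal return value on every nonempty list.

-- t & 0xFFFF (Python-exact, including negatives)
def pyLow16 (t : Int) : Int := PySem.Int.band t 65535

-- ===== PORT A =====
-- A's loop over ticks[1:], carrying wraps and repaired[-1] (the list is only ever appended to,
-- so it is built by structural recursion with the last element as state)
def aLoop (base : Int) : List Int → Int → Int → List Int
  | [], _, _ => []
  | t :: rest, wraps, last =>
    let candidate := base + wraps * 65536 + pyLow16 t
    if candidate < last then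
      let candidate' := base + (wraps + 1) * 65536 + pyLow16 t
      candidate' :: aLoop base rest (wraps + 1) candidate'
    else
      candidate :: aLoop base rest wraps candidate

def repair_timecode_wrap_py (ticks : List Int) : List Int :=
  match ticks with
  | [] => []  -- Python raises IndexError here; excluded by Pre_
  | t0 :: rest =>
    let base := t0 - pyLow16 t0
    let first := base + pyLow16 t0
    first :: aLoop base rest 0 first

-- ===== PORT B =====
-- B's second pass: for (prev, cur) in zip(lows, lows[1:]) append wraps[-1] + (1 if cur < prev else 0)
def bWrapLoop : List (Int × Int) → Int → List Int
  | [], _ => []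
  | (prev, cur) :: rest, w =>
    let w' := w + (if cur < prev then 1 else 0)
    w' :: bWrapLoop rest w'

def repair_timecode_wrap_py_alt (ticks : List Int) : List Int :=
  match ticks with
  | [] => []  -- Python raises IndexError here; excluded by Pre_
  | t0 :: _ =>
    let base := t0 - pyLow16 t0
    let lows := ticks.map pyLow16
    let wraps := 0 :: bWrapLoop (lows.zip lows.tail) 0
    (wraps.zip lows).map (fun p => base + p.1 * 65536 + p.2)

-- ===== PRECONDITION & SPEC =====
-- Pre_ excludes only the empty list, on which A (and B) raise IndexError when reading the first element.
def Pre_repair_timecode_wrap_py (ticks : List Int) : Prop := ticks ≠ []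
instance (ticks : List Int) : Decidable (Pre_repair_timecode_wrap_py ticks) := by unfold Pre_repair_timecode_wrap_py; infer_instance

def pvWitness_repair_timecode_wrap_py : List Int := [65530, 3]

def Spec_repair_timecode_wrap_py (ticks : List Int) (out : List Int) : Prop := out = repair_timecode_wrap_py_alt ticks
instance (ticks : List Int) (out : List Int) : Decidable (Spec_repair_timecode_wrap_py ticks out) := by unfold Spec_repair_timecode_wrap_py; infer_instance

-- ===== CLAIM (what is proved, stated in full; the proofs are below) =====
def Claim_equal_repair_timecode_wrap_py : Prop := ∀ (ticks : List Int), Dom_repair_timecode_wrap_py ticks → Pre_repair_timecode_wrap_py ticks → Spec_repair_timecode_wrap_py ticks (repair_timecode_wrap_py ticks)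

-- ===== LEMMAS AND PROOFS =====

-- Invariant: A's state last = base + wraps*65536 + prevLow, so A's branch test
-- 'candidate < last' is exactly B's 'low t < prevLow', and both loops agree elementwise.
lemma loop_agree (base : Int) : ∀ (rest : List Int) (wraps prevLow : Int),
    aLoop base rest wraps (base + wraps * 65536 + prevLow)
      = ((bWrapLoop ((prevLow :: rest.map pyLow16).zip (rest.map pyLow16)) wraps).zip
          (rest.map pyLow16)).map (fun p => base + p.1 * 65536 + p.2)
  | [], wraps, prevLow => by simp [aLoop, bWrapLoop]
  | t :: rest, wraps, prevLow => by
    by_cases h : pyLow16 t < prevLow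
    · have hc : base + wraps * 65536 + pyLow16 t < base + wraps * 65536 + prevLow := by omega
      simp only [aLoop, bWrapLoop, List.map_cons, List.zip_cons_cons, if_pos hc, if_pos h]
      have ih := loop_agree base rest (wraps + 1) (pyLow16 t)
      rw [ih]
    · have hc : ¬ base + wraps * 65536 + pyLow16 t < base + wraps * 65536 + prevLow := by omega
      simp only [aLoop, bWrapLoop, List.map_cons, List.zip_cons_cons, if_neg hc, if_neg h]
      have ih := loop_agree base rest wraps (pyLow16 t)
      rw [ih]
      simp

-- ===== VERDICT (by name: the statement is the Claim_ definition above) =====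
theorem repair_timecode_wrap_py_spec : Claim_equal_repair_timecode_wrap_py := by
  intro ticks _ hpre
  match ticks with
  | [] => exact absurd rfl hpre
  | t0 :: rest =>
    show repair_timecode_wrap_py (t0 :: rest) = repair_timecode_wrap_py_alt (t0 :: rest)
    simp only [repair_timecode_wrap_py, repair_timecode_wrap_py_alt, List.map_cons, List.tail_cons,
      List.zip_cons_cons, List.map]
    have hb : t0 - pyLow16 t0 + pyLow16 t0 = t0 - pyLow16 t0 + 0 * 65536 + pyLow16 t0 := by ring
    rw [hb, loop_agree (t0 - pyLow16 t0) rest 0 (pyLow16 t0)]
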